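-- pv_equiv track=rewrite | github.com/flynnbr11/QMLA | Libraries/QML_lib/PlotQMD.py | available_position_list
-- ===== SOURCE A (Python) =====
-- def available_position_list(max_this_branch, max_any_branch):
--     # Used to get a list of positions to place nodes centrally
--     N = 2*max_any_branch - 1
--     all_nums = list(range(N))
--     evens = [a for a in all_nums if a%2==0]
--     odds = [a for a in all_nums if a%2!=0]
--
--     diff = max_any_branch-max_this_branch
--     if diff%2==0:
--         all_positions = evens
--         even_odd = 'even'
--     else:
--         all_positions = odds
--         even_odd = 'odd'
--
--     if diff > 1:
--         if even_odd=='even':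
--             to_cut = int(diff/2)
--             available_positions = all_positions[to_cut:-to_cut]
--         else:
--             to_cut = int((diff)/2)
--             available_positions = all_positions[to_cut:-to_cut]
--     else:
--         available_positions = all_positions
--
--     return available_positions
-- ===== SOURCE B (Python) =====
-- def available_position_list(max_this_branch, max_any_branch):
--     # Closed-form arithmetic progression: no range building, filtering or slicing.
--     diff = max_any_branch - max_this_branch
--     start = diff % 2
--     base = max(0, max_any_branch - start)
--     if diff > 1:
--         cut = diff // 2
--         start += 2 * cut
--         count = max(0, base - 2 * cut)
--     else:
--         count = base
--     return list(range(start, start + 2 * count, 2))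
-- ===== Notes on version B (the rewrite author's own statement) =====
-- stated objective: simpler
-- what changed: Instead of materialising range(2*max_any_branch-1), filtering it into evens/odds and slicing with negative indices, B computes the start, stride-2 step and clamped count of the resulting arithmetic progression in O(1) and emits it with a single range call.
import Mathlib
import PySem

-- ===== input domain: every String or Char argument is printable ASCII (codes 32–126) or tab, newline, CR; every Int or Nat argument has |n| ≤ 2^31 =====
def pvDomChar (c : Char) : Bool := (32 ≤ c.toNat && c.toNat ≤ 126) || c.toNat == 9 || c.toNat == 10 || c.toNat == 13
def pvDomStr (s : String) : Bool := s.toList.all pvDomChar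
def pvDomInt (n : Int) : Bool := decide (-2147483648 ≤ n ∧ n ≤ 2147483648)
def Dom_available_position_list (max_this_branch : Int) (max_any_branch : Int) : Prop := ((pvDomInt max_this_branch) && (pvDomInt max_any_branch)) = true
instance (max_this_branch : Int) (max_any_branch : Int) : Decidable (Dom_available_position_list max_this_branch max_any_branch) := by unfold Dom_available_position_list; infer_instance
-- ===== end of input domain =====

-- ===== PORT A =====
-- B replaces A's range/filter/slice pipeline by a direct arithmetic progression (simpler, constant-factor cheaper).
def available_position_list (max_this_branch : Int) (max_any_branch : Int) : List Int :=
  let N : Int := 2 * max_any_branch - 1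
  let all_nums := PySem.List.pyRange 0 N 1
  let evens := all_nums.filter (fun a => PySem.Int.mod a 2 == 0)
  let odds := all_nums.filter (fun a => !(PySem.Int.mod a 2 == 0))
  let diff := max_any_branch - max_this_branch
  let pr := if PySem.Int.mod diff 2 == 0 then (evens, "even") else (odds, "odd")
  let all_positions := pr.1
  let even_odd := pr.2
  if diff > 1 then
    if even_odd == "even" then
      -- int(diff/2): exact as truncating division, |diff| ≤ 2^33 < 2^53 on Dom
      let to_cut := PySem.Int.truncdiv diff 2
      PySem.List.slice all_positions (some to_cut) (some (-to_cut))
    else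
      let to_cut := PySem.Int.truncdiv diff 2
      PySem.List.slice all_positions (some to_cut) (some (-to_cut))
  else all_positions

-- ===== PORT B =====
def available_position_list_alt (max_this_branch : Int) (max_any_branch : Int) : List Int :=
  let diff := max_any_branch - max_this_branch
  let start := PySem.Int.mod diff 2
  let base := max 0 (max_any_branch - start)
  if diff > 1 then
    let cut := PySem.Int.floordiv diff 2
    let start2 := start + 2 * cut
    let count := max 0 (base - 2 * cut)
    PySem.List.pyRange start2 (start2 + 2 * count) 2
  else
    PySem.List.pyRange start (start + 2 * base) 2

-- ===== PRECONDITION & SPEC =====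
def Spec_available_position_list (max_this_branch : Int) (max_any_branch : Int) (out : List Int) : Prop := out = available_position_list_alt max_this_branch max_any_branch
instance (max_this_branch : Int) (max_any_branch : Int) (out : List Int) : Decidable (Spec_available_position_list max_this_branch max_any_branch out) := by unfold Spec_available_position_list; infer_instance

-- ===== CLAIM (what is proved, stated in full; the proofs are below) =====
def Claim_equal_available_position_list : Prop := ∀ (max_this_branch : Int) (max_any_branch : Int), Dom_available_position_list max_this_branch max_any_branch → Spec_available_position_list max_this_branch max_any_branch (available_position_list max_this_branch max_any_branch)

-- ===== LEMMAS AND PROOFS =====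

-- xs[c:-c] of a mapped range, for positive c (Python clamping becomes Nat truncated subtraction)
theorem pv_slice_cut (f : Nat → Int) (n : Nat) (c : Int) (hc : 1 ≤ c) :
    PySem.List.slice ((List.range n).map f) (some c) (some (-c)) =
      (List.range (n - 2*c.toNat)).map (fun k => f (c.toNat + k)) := by
  have hc0 : ¬ c < 0 := by omega
  have hc1 : 0 < c := by omega
  apply List.ext_getElem
  · simp [PySem.List.slice, PySem.List.clampIdx, hc0, hc1]
    split_ifs <;> omega
  · intro i h1 h2
    simp only [PySem.List.slice, PySem.List.clampIdx, hc0] at *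
    simp at h1 h2 ⊢
    congr 1
    omega

theorem pv_range_filter_even (n : Nat) :
    (List.range n).filter (fun k => k % 2 == 0) = (List.range ((n+1)/2)).map (fun k => 2*k) := by
  induction n with
  | zero => rfl
  | succ n ih =>
    rw [List.range_succ, List.filter_append, ih]
    by_cases h : n % 2 = 0
    · have h2 : (n+1+1)/2 = (n+1)/2 + 1 := by omega
      rw [h2, List.range_succ, List.map_append]
      simp [h]
      omega
    · have h2 : (n+1+1)/2 = (n+1)/2 := by omega
      simp [h2, h]

theorem pv_range_filter_odd (n : Nat) :
    (List.range n).filter (fun k => !(k % 2 == 0)) = (List.range (n/2)).map (fun k => 2*k+1) := by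
  induction n with
  | zero => rfl
  | succ n ih =>
    rw [List.range_succ, List.filter_append, ih]
    by_cases h : n % 2 = 0
    · have h2 : (n+1)/2 = n/2 := by omega
      simp [h2, h]
    · have h2 : (n+1)/2 = n/2 + 1 := by omega
      rw [h2, List.range_succ, List.map_append]
      simp [h]
      omega

-- the evens of range(2*M-1), as a mapped Nat range
theorem pv_evens_char (M : Int) :
    (PySem.List.pyRange 0 (2*M-1) 1).filter (fun a => a % 2 == 0) =
      (List.range M.toNat).map (fun k => ((2*k : Nat) : Int)) := by
  rw [PySem.List.pyRange_one, List.filter_map]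
  have hp : ((fun a : Int => a % 2 == 0) ∘ fun k : Nat => (0:Int) + ↑k) =
      fun k : Nat => k % 2 == 0 := by
    funext k
    simp [Function.comp]
    omega
  rw [hp, pv_range_filter_even]
  have hn : ((2*M-1-0).toNat + 1)/2 = M.toNat := by omega
  rw [hn, List.map_map]
  apply List.map_congr_left
  intro k _
  simp

theorem pv_odds_char (M : Int) :
    (PySem.List.pyRange 0 (2*M-1) 1).filter (fun a => !(a % 2 == 0)) =
      (List.range (M-1).toNat).map (fun k => ((2*k+1 : Nat) : Int)) := by
  rw [PySem.List.pyRange_one, List.filter_map]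
  have hp : ((fun a : Int => !(a % 2 == 0)) ∘ fun k : Nat => (0:Int) + ↑k) =
      fun k : Nat => !(k % 2 == 0) := by
    funext k
    simp [Function.comp]
    omega
  rw [hp, pv_range_filter_odd]
  have hn : (2*M-1-0).toNat/2 = (M-1).toNat := by omega
  rw [hn, List.map_map]
  apply List.map_congr_left
  intro k _
  simp

-- B's step-2 range as a mapped Nat range
theorem pv_alt_char (a count : Int) (hcount : 0 ≤ count) :
    PySem.List.pyRange a (a + 2*count) 2 =
      (List.range count.toNat).map (fun k : Nat => a + 2*(k:Int)) := by
  rw [PySem.List.pyRange_of_pos a (a + 2*count) (by omega : (0:Int) < 2)]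
  have hn : (if a < a + 2*count then ((a + 2*count - a + 2 - 1) / 2).toNat else 0) = count.toNat := by
    split_ifs <;> omega
  rw [hn]

-- ===== VERDICT (by name: the statement is the Claim_ definition above) =====
theorem available_position_list_spec : Claim_equal_available_position_list := by
  intro m M _hdom
  unfold Spec_available_position_list available_position_list available_position_list_alt
  set diff := M - m with hdiff
  have h2 : (0:Int) < 2 := by omega
  simp only [PySem.Int.mod_eq_emod_of_pos h2, PySem.Int.floordiv_eq_ediv_of_pos h2]
  by_cases hd : diff > 1
  · -- diff > 1: slice case
    have hcutpos : (1:Int) ≤ diff / 2 := by omega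
    have hcut : ((diff / 2).toNat : Int) = diff / 2 := by omega
    have htdiv : PySem.Int.truncdiv diff 2 = diff / 2 := by
      unfold PySem.Int.truncdiv
      rw [Int.tdiv_eq_ediv_of_nonneg (by omega : (0:Int) ≤ diff)]
    by_cases hpar : diff % 2 = 0
    · -- even diff: evens list, start = 0
      simp only [hpar, hd, beq_self_eq_true, if_pos, htdiv]
      rw [pv_evens_char, pv_slice_cut _ _ _ hcutpos,
        pv_alt_char _ _ (by omega : (0:Int) ≤ max 0 (max 0 (M - 0) - 2 * (diff / 2)))]
      have hn : M.toNat - 2*(diff/2).toNat = (max 0 (max 0 (M - 0) - 2 * (diff / 2))).toNat := by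
        omega
      rw [hn]
      apply List.map_congr_left
      intro k _
      push_cast [hcut]
      ring
    · -- odd diff: odds list, start = 1
      have hpar1 : diff % 2 = 1 := by omega
      simp only [hpar1, hd, if_pos]
      norm_num
      simp only [htdiv]
      rw [pv_odds_char, pv_slice_cut _ _ _ hcutpos,
        pv_alt_char _ _ (by omega : (0:Int) ≤ max 0 (max 0 (M - 1) - 2 * (diff / 2)))]
      have hn : (M-1).toNat - 2*(diff/2).toNat = (max 0 (max 0 (M - 1) - 2 * (diff / 2))).toNat := by
        omega
      rw [hn]
      apply List.map_congr_left
      intro k _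
      push_cast [hcut]
      ring
  · -- diff <= 1: full list
    by_cases hpar : diff % 2 = 0
    · simp only [hpar, hd, if_false]
      norm_num
      have halt := pv_alt_char 0 (max 0 M) (by omega : (0:Int) ≤ max 0 M)
      norm_num at halt
      rw [pv_evens_char, halt]
      have hn : M.toNat = (max 0 M).toNat := by omega
      rw [hn]
      apply List.map_congr_left
      intro k _
      push_cast
      ring
    · have hpar1 : diff % 2 = 1 := by omega
      simp only [hpar1, hd, if_false]
      norm_num
      have halt := pv_alt_char 1 (max 0 (M - 1)) (by omega : (0:Int) ≤ max 0 (M - 1))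
      norm_num at halt
      rw [pv_odds_char, halt]
      have hn : (M-1).toNat = (max 0 (M - 1)).toNat := by omega
      rw [hn]
      apply List.map_congr_left
      intro k _
      push_cast
      ring
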